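-- pv_equiv track=rewrite | github.com/STABLE-TURBO/NeuralDBG | neural/benchmarks/metrics_collector.py | count_lines
-- ===== SOURCE A (Python) =====
-- from typing import Any, Dict, List, Optional
--
-- def count_lines(code: str) -> Dict[str, int]:
--     """Count different types of lines in code."""
--     lines = code.split("\n")
--
--     total = len(lines)
--     empty = sum(1 for line in lines if not line.strip())
--     comments = sum(1 for line in lines if line.strip().startswith("#"))
--     code_lines = total - empty - comments
--
--     return {
--         "total": total,
--         "empty": empty,
--         "comments": comments,
--         "code": code_lines,
--         "non_empty": total - empty,
--     }
-- ===== SOURCE B (Python) =====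
-- def count_lines(code: str):
--     """Count different types of lines in code via one character-level scan.
--
--     Never splits or strips: walks the characters once, remembering only the
--     first non-whitespace character of the current line, and classifies each
--     line when its terminating newline (or the end of input) is reached.
--     """
--     total = 1
--     empty = comments = code_lines = 0
--     first = None  # first non-whitespace char of the current line, if any
--     for ch in code:
--         if ch == "\n":
--             if first is None:
--                 empty += 1
--             elif first == "#":
--                 comments += 1
--             else:
--                 code_lines += 1
--             total += 1
--             first = None
--         elif first is None and not ch.isspace():
--             first = ch
--     if first is None:
--         empty += 1
--     elif first == "#":
--         comments += 1
--     else: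
--         code_lines += 1
--     return {
--         "total": total,
--         "empty": empty,
--         "comments": comments,
--         "code": code_lines,
--         "non_empty": total - empty,
--     }
-- ===== Notes on version B (the rewrite author's own statement) =====
-- stated objective: alternative
-- what changed: B never calls split/strip/startswith: it is a character-level state machine that scans the string once, remembering only the first non-whitespace character of the current line, and classifies each line at its newline, while A splits into lines and runs two strip-based counting comprehensions plus subtraction.
import Mathlib
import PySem

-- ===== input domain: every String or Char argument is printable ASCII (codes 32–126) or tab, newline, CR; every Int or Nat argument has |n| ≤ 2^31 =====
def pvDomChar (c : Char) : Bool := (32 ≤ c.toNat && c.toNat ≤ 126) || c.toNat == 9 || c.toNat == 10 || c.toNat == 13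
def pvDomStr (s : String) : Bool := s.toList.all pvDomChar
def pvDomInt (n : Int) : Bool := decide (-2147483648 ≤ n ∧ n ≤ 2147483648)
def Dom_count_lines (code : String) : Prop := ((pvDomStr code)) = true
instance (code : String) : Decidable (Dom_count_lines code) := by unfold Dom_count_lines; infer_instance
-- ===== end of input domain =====

-- B replaces A's split-into-lines plus two strip-based counting passes by a single
-- character-level state machine that remembers only the first non-whitespace character
-- of the current line (objective: alternative).

-- ===== PORT A =====
-- code.split("\n") with a non-empty literal separator: split? always returns some, getD [] is never taken
def count_lines (code : String) : List (String × Int) :=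
  let lines := (PySem.Str.split? code "\n").getD []
  let total : Int := lines.length
  let empty : Int := lines.foldl (fun acc l => if PySem.Str.strip l = "" then acc + 1 else acc) 0
  let comments : Int := lines.foldl (fun acc l => if PySem.Str.startswith (PySem.Str.strip l) "#" then acc + 1 else acc) 0
  let code_lines := total - empty - comments
  [("total", total), ("empty", empty), ("comments", comments),
   ("code", code_lines), ("non_empty", total - empty)]

-- ===== PORT B =====
-- the body of B's `for ch in code` loop, on state (total, empty, comments, code_lines, first)
def pvStepB (st : Int × Int × Int × Int × Option Char) (ch : Char) : Int × Int × Int × Int × Option Char :=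
  let (total, empty, comments, code_lines, first) := st
  if ch = '\n' then
    if first = none then (total + 1, empty + 1, comments, code_lines, none)
    else if first = some '#' then (total + 1, empty, comments + 1, code_lines, none)
    else (total + 1, empty, comments, code_lines + 1, none)
  else if first = none ∧ PySem.Chars.isspace ch = false then
    (total, empty, comments, code_lines, some ch)
  else st

def count_lines_alt (code : String) : List (String × Int) :=
  let st := code.toList.foldl pvStepB (1, 0, 0, 0, none)
  let (total, empty, comments, code_lines, first) := st
  let (empty, comments, code_lines) :=
    if first = none then (empty + 1, comments, code_lines)
    else if first = some '#' then (empty, comments + 1, code_lines)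
    else (empty, comments, code_lines + 1)
  [("total", total), ("empty", empty), ("comments", comments),
   ("code", code_lines), ("non_empty", total - empty)]

-- ===== PRECONDITION & SPEC =====
def Spec_count_lines (code : String) (out : List (String × Int)) : Prop := out = count_lines_alt code
instance (code : String) (out : List (String × Int)) : Decidable (Spec_count_lines code out) := by unfold Spec_count_lines; infer_instance

-- ===== CLAIM (what is proved, stated in full; the proofs are below) =====
def Claim_equal_count_lines : Prop := ∀ (code : String), Dom_count_lines code → Spec_count_lines code (count_lines code)

-- ===== LEMMAS AND PROOFS =====

-- structural specification of PySem.Chars.splitOn on the one-character separator '\n'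
def pvMySplit : List Char → List (List Char)
  | [] => [[]]
  | c :: rest =>
    if c = '\n' then [] :: pvMySplit rest
    else
      match pvMySplit rest with
      | [] => [[c]]
      | h :: t => (c :: h) :: t

lemma pvMySplit_ne_nil (cs : List Char) : pvMySplit cs ≠ [] := by
  cases cs with
  | nil => simp [pvMySplit]
  | cons c rest =>
    simp only [pvMySplit]
    split_ifs
    · simp
    · cases h : pvMySplit rest <;> simp

lemma pvSplitOn_go_eq (fuel : Nat) (s cur : List Char) (acc : List (List Char))
    (h : s.length < fuel) :
    PySem.Chars.splitOn.go ['\n'] fuel s cur acc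
      = acc.reverse ++ (pvMySplit s).modifyHead (cur.reverse ++ ·) := by
  induction fuel generalizing s cur acc with
  | zero => omega
  | succ n ih =>
    cases s with
    | nil => simp [PySem.Chars.splitOn.go, pvMySplit]
    | cons c rest =>
      by_cases hc : c = '\n'
      · subst hc
        rw [show PySem.Chars.splitOn.go ['\n'] (n+1) ('\n'::rest) cur acc
              = PySem.Chars.splitOn.go ['\n'] n rest [] (cur.reverse :: acc) from by
            simp [PySem.Chars.splitOn.go, List.isPrefixOf]]
        rw [ih rest [] (cur.reverse :: acc) (by simp at h; omega)]
        simp [pvMySplit]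
        cases pvMySplit rest <;> simp
      · rw [show PySem.Chars.splitOn.go ['\n'] (n+1) (c::rest) cur acc
              = PySem.Chars.splitOn.go ['\n'] n rest (c :: cur) acc from by
            simp [PySem.Chars.splitOn.go, List.isPrefixOf]
            intro hh; exact absurd hh.symm hc]
        rw [ih rest (c :: cur) acc (by simp at h; omega)]
        simp only [pvMySplit, if_neg hc]
        cases hms : pvMySplit rest with
        | nil => exact absurd hms (pvMySplit_ne_nil rest)
        | cons hd tl => simp

lemma pvSplitOn_newline (s : List Char) :
    PySem.Chars.splitOn s ['\n'] = pvMySplit s := by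
  rw [PySem.Chars.splitOn, pvSplitOn_go_eq (s.length + 1) s [] [] (by omega)]
  cases hms : pvMySplit s with
  | nil => exact absurd hms (pvMySplit_ne_nil s)
  | cons hd tl => simp

lemma pvMySplit_length (cs : List Char) :
    (pvMySplit cs).length = cs.count '\n' + 1 := by
  induction cs with
  | nil => simp [pvMySplit]
  | cons c rest ih =>
    by_cases hc : c = '\n'
    · subst hc; simp [pvMySplit, ih]
    · simp only [pvMySplit, if_neg hc]
      cases hms : pvMySplit rest with
      | nil => exact absurd hms (pvMySplit_ne_nil rest)
      | cons hd tl =>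
        rw [hms] at ih
        simp [hc, ← ih]

-- the first non-whitespace character of a line (B's `first` at the end of that line)
def pvFirstNW (l : List Char) : Option Char := (l.dropWhile PySem.Chars.isspace).head?

-- the (empty, comments, code) increment a line with first non-whitespace char f contributes
def pvCls (f : Option Char) : Int × Int × Int :=
  match f with
  | none => (1, 0, 0)
  | some d => if d = '#' then (0, 1, 0) else (0, 0, 1)

def pvMerge (f : Option Char) (l : List Char) : Option Char :=
  match f with
  | some d => some d
  | none => pvFirstNW l

def pvTailSum (L : List (List Char)) : Int × Int × Int :=
  (L.map (fun l => pvCls (pvFirstNW l))).sum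

def pvLineCounts (f : Option Char) : List (List Char) → Int × Int × Int
  | [] => (0, 0, 0)
  | h :: tl => pvCls (pvMerge f h) + pvTailSum tl

def pvCounts (st : Int × Int × Int × Int × Option Char) : Int × Int × Int × Int :=
  (st.1, st.2.1 + (pvCls st.2.2.2.2).1, st.2.2.1 + (pvCls st.2.2.2.2).2.1,
   st.2.2.2.1 + (pvCls st.2.2.2.2).2.2)

lemma pvLineCounts_none (L : List (List Char)) : pvLineCounts none L = pvTailSum L := by
  cases L with
  | nil => simp [pvLineCounts, pvTailSum]
  | cons h tl => simp [pvLineCounts, pvTailSum, pvMerge]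

lemma pvFirstNW_cons (c : Char) (l : List Char) :
    pvFirstNW (c :: l)
      = if PySem.Chars.isspace c = false then some c else pvFirstNW l := by
  unfold pvFirstNW
  rw [List.dropWhile_cons]
  by_cases hc : PySem.Chars.isspace c = true <;> simp_all

lemma pvMerge_cons (f : Option Char) (c : Char) (l : List Char) :
    pvMerge f (c :: l)
      = pvMerge (if f = none ∧ PySem.Chars.isspace c = false then some c else f) l := by
  cases f with
  | some d => simp [pvMerge]
  | none =>
    by_cases hc : PySem.Chars.isspace c = false <;>
      simp [pvMerge, pvFirstNW_cons, hc]

lemma pvStepB_newline (t e c k : Int) (f : Option Char) :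
    pvStepB (t, e, c, k, f) '\n'
      = (t + 1, e + (pvCls f).1, c + (pvCls f).2.1, k + (pvCls f).2.2, none) := by
  cases f with
  | none => simp [pvStepB, pvCls]
  | some d =>
    by_cases hd : d = '#' <;> simp [pvStepB, pvCls, hd]

lemma pvStepB_other (t e c k : Int) (f : Option Char) (ch : Char) (hch : ch ≠ '\n') :
    pvStepB (t, e, c, k, f) ch
      = (t, e, c, k, if f = none ∧ PySem.Chars.isspace ch = false then some ch else f) := by
  by_cases hf : f = none ∧ PySem.Chars.isspace ch = false <;> simp [pvStepB, hch, hf]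

-- main invariant: B's machine computes, for any start state, line-by-line counts of pvMySplit
lemma pvMain (cs : List Char) : ∀ (t e c k : Int) (f : Option Char),
    pvCounts (cs.foldl pvStepB (t, e, c, k, f))
      = (t + (cs.count '\n' : Int),
         e + (pvLineCounts f (pvMySplit cs)).1,
         c + (pvLineCounts f (pvMySplit cs)).2.1,
         k + (pvLineCounts f (pvMySplit cs)).2.2) := by
  induction cs with
  | nil =>
    intro t e c k f
    cases f with
    | none => simp [pvCounts, pvLineCounts, pvMySplit, pvMerge, pvFirstNW, pvTailSum]
    | some d => simp [pvCounts, pvLineCounts, pvMySplit, pvMerge, pvTailSum]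
  | cons ch rest ih =>
    intro t e c k f
    by_cases hch : ch = '\n'
    · subst hch
      have hm : pvMerge f ([] : List Char) = f := by
        cases f <;> simp [pvMerge, pvFirstNW]
      have hlc : pvLineCounts f (pvMySplit ('\n' :: rest))
          = pvCls f + pvTailSum (pvMySplit rest) := by
        simp [pvMySplit, pvLineCounts, hm]
      rw [List.foldl_cons, pvStepB_newline, ih, pvLineCounts_none, hlc]
      simp [Prod.mk.injEq, Prod.fst_add, Prod.snd_add]
      omega
    · rw [List.foldl_cons, pvStepB_other t e c k f ch hch, ih]
      have hsplit : pvLineCounts f (pvMySplit (ch :: rest))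
          = pvLineCounts (if f = none ∧ PySem.Chars.isspace ch = false then some ch else f)
              (pvMySplit rest) := by
        simp only [pvMySplit, if_neg hch]
        cases hms : pvMySplit rest with
        | nil => exact absurd hms (pvMySplit_ne_nil rest)
        | cons hd tl => simp [pvLineCounts, pvMerge_cons]
      simp [hsplit, hch]

-- classification of one line: A's strip-based tests read exactly pvFirstNW
lemma pvDropWhile_head_false (p : Char → Bool) (l : List Char) (d : Char) (ds : List Char)
    (h : l.dropWhile p = d :: ds) : p d = false := by
  have := List.head?_dropWhile_not p l
  rw [h] at this
  simpa using this

lemma pvHead?_strip (l : List Char) :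
    (PySem.Chars.strip l).head? = pvFirstNW l := by
  unfold PySem.Chars.strip PySem.Chars.lstrip PySem.Chars.rstrip pvFirstNW
  cases hd : l.dropWhile PySem.Chars.isspace with
  | nil => simp
  | cons d ds =>
    have hdns : PySem.Chars.isspace d = false := pvDropWhile_head_false _ l d ds hd
    rw [show (d :: ds).reverse = ds.reverse ++ [d] from by simp]
    rw [List.dropWhile_append]
    by_cases he : (List.dropWhile PySem.Chars.isspace ds.reverse).isEmpty = true
    · rw [if_pos he]
      simp [hdns]
    · rw [if_neg he]
      simp

lemma pvStrip_eq_nil_iff (l : List Char) :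
    PySem.Chars.strip l = [] ↔ pvFirstNW l = none := by
  rw [← pvHead?_strip, List.head?_eq_none_iff]

lemma pvStartswith_hash_iff (l : List Char) :
    PySem.Chars.startswith (PySem.Chars.strip l) ['#'] = true ↔ pvFirstNW l = some '#' := by
  rw [← pvHead?_strip, PySem.Chars.startswith_iff]
  cases PySem.Chars.strip l with
  | nil => simp
  | cons d ds => simp [List.cons_prefix_cons, eq_comm]

-- String-level versions, for the lines A builds with String.ofList
lemma pvStrA_empty (l : List Char) :
    (PySem.Str.strip (String.ofList l) = "") ↔ pvFirstNW l = none := by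
  rw [← pvStrip_eq_nil_iff]
  constructor
  · intro h
    have := congrArg String.toList h
    simpa [PySem.Str.strip] using this
  · intro h
    simp [PySem.Str.strip, h]

lemma pvStrA_hash (l : List Char) :
    (PySem.Str.startswith (PySem.Str.strip (String.ofList l)) "#" = true)
      ↔ pvFirstNW l = some '#' := by
  rw [← pvStartswith_hash_iff]
  have h1 : (PySem.Str.strip (String.ofList l)).toList = PySem.Chars.strip l := by
    simp [PySem.Str.strip]
  have h2 : ("#" : String).toList = ['#'] := by decide
  rw [PySem.Str.startswith, h1, h2]

-- component sums of pvTailSum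
lemma pvTailSum_components (L : List (List Char)) :
    pvTailSum L
      = ((L.map (fun l => (pvCls (pvFirstNW l)).1)).sum,
         (L.map (fun l => (pvCls (pvFirstNW l)).2.1)).sum,
         (L.map (fun l => (pvCls (pvFirstNW l)).2.2)).sum) := by
  induction L with
  | nil => rfl
  | cons h tl ih =>
    simp only [pvTailSum, List.map_cons, List.sum_cons] at ih ⊢
    rw [ih]
    rcases h1 : pvCls (pvFirstNW h) with ⟨a, b, c⟩
    simp [Prod.mk_add_mk]

lemma pvCls_sum_one (f : Option Char) :
    (pvCls f).1 + (pvCls f).2.1 + (pvCls f).2.2 = 1 := by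
  cases f with
  | none => simp [pvCls]
  | some d => by_cases hd : d = '#' <;> simp [pvCls, hd]

lemma pvIf_add (P : Prop) [Decidable P] (acc : Int) :
    (if P then acc + 1 else acc) = acc + (if P then 1 else 0) := by
  split_ifs <;> ring

-- the three per-line indicators: written as components of pvCls
lemma pvClsE (l : List Char) :
    (pvCls (pvFirstNW l)).1 = if pvFirstNW l = none then 1 else 0 := by
  cases hf : pvFirstNW l with
  | none => simp [pvCls]
  | some d => by_cases hd : d = '#' <;> simp [pvCls, hd]

lemma pvClsC (l : List Char) :
    (pvCls (pvFirstNW l)).2.1 = if pvFirstNW l = some '#' then 1 else 0 := by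
  cases hf : pvFirstNW l with
  | none => simp [pvCls]
  | some d => by_cases hd : d = '#' <;> simp [pvCls, hd]

lemma pvSumE_C_K (L : List (List Char)) :
    (L.map (fun l => (pvCls (pvFirstNW l)).1)).sum
      + (L.map (fun l => (pvCls (pvFirstNW l)).2.1)).sum
      + (L.map (fun l => (pvCls (pvFirstNW l)).2.2)).sum
      = (L.length : Int) := by
  induction L with
  | nil => simp
  | cons h tl ih =>
    simp only [List.map_cons, List.sum_cons, List.length_cons]
    have := pvCls_sum_one (pvFirstNW h)
    push_cast
    push_cast at ih
    omega

lemma pvClassify_eq (e c k : Int) (f : Option Char) :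
    (if f = none then (e + 1, c, k)
     else if f = some '#' then (e, c + 1, k)
     else (e, c, k + 1))
      = (e + (pvCls f).1, c + (pvCls f).2.1, k + (pvCls f).2.2) := by
  cases f with
  | none => simp [pvCls]
  | some d => by_cases hd : d = '#' <;> simp [pvCls, hd]

-- ===== VERDICT (by name: the statement is the Claim_ definition above) =====
theorem count_lines_spec : Claim_equal_count_lines := by
  intro code _
  unfold Spec_count_lines count_lines count_lines_alt
  -- A's split into lines
  have hsplit : (PySem.Str.split? code "\n").getD []
      = (pvMySplit code.toList).map String.ofList := by
    have : ("\n" : String).toList = ['\n'] := by decide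
    simp [PySem.Str.split?, PySem.Chars.split?, this, pvSplitOn_newline]
  rw [hsplit]
  -- B's machine result
  rcases hst : code.toList.foldl pvStepB ((1 : Int), (0 : Int), (0 : Int), (0 : Int),
      (none : Option Char)) with ⟨t, e, c, k, f⟩
  have hmain := pvMain code.toList 1 0 0 0 none
  rw [hst, pvLineCounts_none] at hmain
  set L := pvMySplit code.toList with hL
  rw [pvTailSum_components] at hmain
  simp only [pvCounts, Prod.mk.injEq] at hmain
  obtain ⟨ht, he, hc, hk⟩ := hmain
  -- reduce A's folds to the same sums
  simp only [List.foldl_map, List.length_map]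
  simp only [pvStrA_empty, pvStrA_hash]
  simp only [pvIf_add]
  rw [PySem.List.foldl_add L (fun l => if pvFirstNW l = none then (1 : Int) else 0) 0,
      PySem.List.foldl_add L (fun l => if pvFirstNW l = some '#' then (1 : Int) else 0) 0]
  simp only [← pvClsE, ← pvClsC]
  -- assemble: every entry of the two association lists agrees
  have hlen : (L.length : Int) = (code.toList.count '\n' : Int) + 1 := by
    rw [hL, pvMySplit_length]; push_cast; ring
  have hsum := pvSumE_C_K L
  rw [pvClassify_eq]
  simp [List.cons.injEq, Prod.mk.injEq]
  omega
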